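-- pv_equiv track=rewrite | github.com/Highdrien/Markdown_to_LaTeX_Converter | src/alt_96.py | check_alt_96_inline
-- ===== SOURCE A (Python) =====
-- def check_alt_96_inline(line):
--     if '`' in line and not '```' in line:
--         new_line = ''
--         split_line = line.split('`')
--         count = 1
--         for i, words in enumerate(split_line):
--             if i != 0:
--                 if count % 2 == 1:
--                     new_line += r"\textit{" + words
--                 else:
--                     new_line += "}" + words
--                 count += 1
--             else:
--                 new_line += words
--
--         if count % 2 == 0:
--             new_line += "}"
--
--         return new_line
--     return line
-- ===== SOURCE B (Python) =====
-- def check_alt_96_inline(line):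
--     if '`' not in line or '```' in line:
--         return line
--     out = []
--     open_next = True
--     for ch in line:
--         if ch == '`':
--             out.append("\\textit{" if open_next else "}")
--             open_next = not open_next
--         else:
--             out.append(ch)
--     if not open_next:
--         out.append("}")
--     return ''.join(out)
-- ===== Notes on version B (the rewrite author's own statement) =====
-- stated objective: simpler
-- what changed: Replaces A's split-on-backtick, enumerate-and-count reassembly with a single character scan carrying one boolean toggle; no split list and no counter are built.
import Mathlib
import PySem

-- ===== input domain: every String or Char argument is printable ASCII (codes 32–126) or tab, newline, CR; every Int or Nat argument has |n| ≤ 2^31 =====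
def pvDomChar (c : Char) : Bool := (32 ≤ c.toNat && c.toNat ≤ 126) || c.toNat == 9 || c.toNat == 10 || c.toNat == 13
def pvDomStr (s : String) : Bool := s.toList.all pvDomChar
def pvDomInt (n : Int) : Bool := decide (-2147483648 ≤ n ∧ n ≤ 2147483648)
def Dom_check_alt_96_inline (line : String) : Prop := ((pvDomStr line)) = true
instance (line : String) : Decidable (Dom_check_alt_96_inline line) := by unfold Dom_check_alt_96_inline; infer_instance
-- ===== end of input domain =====

-- B replaces A's split-on-backtick / counter reassembly by a single char scan with a boolean toggle (simpler).

-- ===== PORT A =====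
-- literal transliteration of A: split on '`', rebuild with an alternating counter
def check_alt_96_inline (line : String) : String :=
  let cs := line.toList
  if PySem.Chars.isIn ['`'] cs && !(PySem.Chars.isIn ['`', '`', '`'] cs) then
    let split_line := PySem.Chars.splitOn cs ['`']
    let st :=
      (PySem.List.enumerate split_line).foldl
        (fun (st : List Char × Int) p =>
          if p.1 ≠ 0 then
            if PySem.Int.mod st.2 2 == 1 then
              (st.1 ++ "\\textit{".toList ++ p.2, st.2 + 1)
            else
              (st.1 ++ ['}'] ++ p.2, st.2 + 1)
          else
            (st.1 ++ p.2, st.2))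
        (([] : List Char), (1 : Int))
    let new_line := if PySem.Int.mod st.2 2 == 0 then st.1 ++ ['}'] else st.1
    String.mk new_line
  else line

-- ===== PORT B =====
-- literal transliteration of Source B: one pass over the characters with a boolean toggle
def check_alt_96_inline_alt (line : String) : String :=
  let cs := line.toList
  if !(PySem.Chars.isIn ['`'] cs) || PySem.Chars.isIn ['`', '`', '`'] cs then line
  else
    let st :=
      cs.foldl
        (fun (st : List Char × Bool) ch =>
          if ch == '`' then
            (st.1 ++ (if st.2 then "\\textit{".toList else ['}']), !st.2)
          else
            (st.1 ++ [ch], st.2))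
        (([] : List Char), true)
    String.mk (if !st.2 then st.1 ++ ['}'] else st.1)

-- ===== PRECONDITION & SPEC =====
def Spec_check_alt_96_inline (line : String) (out : String) : Prop := out = check_alt_96_inline_alt line
instance (line : String) (out : String) : Decidable (Spec_check_alt_96_inline line out) := by unfold Spec_check_alt_96_inline; infer_instance

-- ===== CLAIM (what is proved, stated in full; the proofs are below) =====
def Claim_equal_check_alt_96_inline : Prop := ∀ (line : String), Dom_check_alt_96_inline line → Spec_check_alt_96_inline line (check_alt_96_inline line)

-- ===== LEMMAS AND PROOFS =====

-- simple recursive characterisation of splitting on one character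
def pvSplit1 (c : Char) : List Char → List (List Char)
  | [] => [[]]
  | x :: t =>
    if x = c then [] :: pvSplit1 c t
    else
      match pvSplit1 c t with
      | [] => [[x]]          -- unreachable: pvSplit1 is never []
      | p :: ps => (x :: p) :: ps

lemma pvSplit1_ne_nil (c : Char) (l : List Char) : pvSplit1 c l ≠ [] := by
  cases l with
  | nil => simp [pvSplit1]
  | cons x t =>
    simp only [pvSplit1]
    split
    · simp
    · cases h : pvSplit1 c t <;> simp

def pvModHead (f : List Char → List Char) : List (List Char) → List (List Char)
  | [] => []
  | p :: ps => f p :: ps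

lemma pvGo_spec (c : Char) (l : List Char) : ∀ (fuel : Nat) (cur : List Char) (acc : List (List Char)),
    l.length < fuel →
    PySem.Chars.splitOn.go [c] fuel l cur acc
      = acc.reverse ++ pvModHead (cur.reverse ++ ·) (pvSplit1 c l) := by
  induction l with
  | nil =>
    intro fuel cur acc h
    cases fuel with
    | zero => omega
    | succ n => simp [PySem.Chars.splitOn.go, pvSplit1, pvModHead]
  | cons x t ih =>
    intro fuel cur acc h
    cases fuel with
    | zero => omega
    | succ n =>
      by_cases hx : x = c
      · subst hx
        have hpre : List.isPrefixOf [x] (x :: t) = true := by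
          simp [List.isPrefixOf]
        rw [PySem.Chars.splitOn.go]
        simp only [hpre, if_true]
        have ht : t.length < n := by simp at h; omega
        rw [show List.drop (List.length [x]) (x :: t) = t by simp]
        rw [ih n [] (cur.reverse :: acc) ht]
        simp [pvSplit1]
        cases hs : pvSplit1 x t with
        | nil => exact absurd hs (pvSplit1_ne_nil x t)
        | cons p ps => simp [pvModHead]
      · have hpre : List.isPrefixOf [c] (x :: t) = false := by
          simp [List.isPrefixOf]; exact fun hc => absurd hc.symm hx
        rw [PySem.Chars.splitOn.go]
        simp only [hpre]
        have ht : t.length < n := by simp at h; omega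
        rw [if_neg (by simp)]
        rw [ih n (x :: cur) acc ht]
        simp only [pvSplit1, if_neg hx]
        cases hs : pvSplit1 c t with
        | nil => exact absurd hs (pvSplit1_ne_nil c t)
        | cons p ps => simp [pvModHead]

lemma pvSplitOn_eq (c : Char) (l : List Char) :
    PySem.Chars.splitOn l [c] = pvSplit1 c l := by
  rw [PySem.Chars.splitOn, pvGo_spec c l (l.length + 1) [] [] (by omega)]
  cases hs : pvSplit1 c l with
  | nil => exact absurd hs (pvSplit1_ne_nil c l)
  | cons p ps => simp [pvModHead]

-- the common target: one scan over the characters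
def pvScan : List Char → Bool → List Char
  | [], _ => []
  | x :: t, b =>
    if x = '`' then (if b then "\\textit{".toList else ['}']) ++ pvScan t (!b)
    else x :: pvScan t b

def pvPar : List Char → Bool → Bool
  | [], b => b
  | x :: t, b => if x = '`' then pvPar t (!b) else pvPar t b


-- the step functions of the two folds, named for the proofs
def pvStepB (st : List Char × Bool) (ch : Char) : List Char × Bool :=
  if ch == '`' then
    (st.1 ++ (if st.2 then "\\textit{".toList else ['}']), !st.2)
  else
    (st.1 ++ [ch], st.2)

def pvStepA (st : List Char × Int) (p : Int × List Char) : List Char × Int :=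
  if p.1 ≠ 0 then
    if PySem.Int.mod st.2 2 == 1 then
      (st.1 ++ "\\textit{".toList ++ p.2, st.2 + 1)
    else
      (st.1 ++ ['}'] ++ p.2, st.2 + 1)
  else
    (st.1 ++ p.2, st.2)

-- the two bodies of the guarded branch, named for the proofs (definitionally the ports' branches)
def pvBodyA (cs : List Char) : List Char :=
  let st := List.foldl pvStepA (([] : List Char), (1 : Int)) (PySem.List.enumerate (PySem.Chars.splitOn cs ['`']))
  if PySem.Int.mod st.2 2 == 0 then st.1 ++ ['}'] else st.1

def pvBodyB (cs : List Char) : List Char :=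
  let st := List.foldl pvStepB (([] : List Char), true) cs
  if !st.2 then st.1 ++ ['}'] else st.1

-- B's fold computes (acc ++ pvScan cs b, pvPar cs b)
lemma foldB_spec (cs : List Char) : ∀ (acc : List Char) (b : Bool),
    cs.foldl pvStepB (acc, b) = (acc ++ pvScan cs b, pvPar cs b) := by
  induction cs with
  | nil => intro acc b; simp [pvScan, pvPar]
  | cons x t ih =>
    intro acc b
    rw [List.foldl_cons]
    by_cases hx : x = '`'
    · subst hx
      rw [show pvStepB (acc, b) '`'
            = (acc ++ (if b then "\\textit{".toList else ['}']), !b) from by simp [pvStepB]]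
      rw [ih]
      cases b <;> simp [pvScan, pvPar]
    · rw [show pvStepB (acc, b) x = (acc ++ [x], b) from by simp [pvStepB, hx]]
      rw [ih]
      simp [pvScan, pvPar, hx]

-- glue for A's non-head pieces, driven by the parity of the Int counter
def pvGlue : List (List Char) → Int → List Char
  | [], _ => []
  | p :: ps, k =>
    (if PySem.Int.mod k 2 == 1 then "\\textit{".toList else ['}']) ++ p ++ pvGlue ps (k + 1)

-- A's fold over enumerate, for indices starting at i ≥ 1
lemma foldA_tail (ps : List (List Char)) : ∀ (i : Int), 1 ≤ i → ∀ (nl : List Char) (k : Int),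
    (PySem.List.enumerate ps i).foldl pvStepA (nl, k) = (nl ++ pvGlue ps k, k + ps.length) := by
  induction ps with
  | nil => intro i hi nl k; simp [PySem.List.enumerate, pvGlue]
  | cons p ps ih =>
    intro i hi nl k
    rw [show PySem.List.enumerate (p :: ps) i = (i, p) :: PySem.List.enumerate ps (i + 1) from rfl]
    rw [List.foldl_cons]
    by_cases hk : PySem.Int.mod k 2 == 1
    · rw [show pvStepA (nl, k) (i, p) = (nl ++ "\\textit{".toList ++ p, k + 1) from by
        simp only [pvStepA]; rw [if_pos (show ¬ i = 0 by omega), if_pos hk]]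
      rw [ih (i + 1) (by omega)]
      simp only [pvGlue, if_pos hk, Prod.mk.injEq]
      exact ⟨by simp, by simp; omega⟩
    · rw [show pvStepA (nl, k) (i, p) = (nl ++ ['}'] ++ p, k + 1) from by
        simp only [pvStepA]; rw [if_pos (show ¬ i = 0 by omega), if_neg hk]]
      rw [ih (i + 1) (by omega)]
      simp only [pvGlue, if_neg hk, Prod.mk.injEq]
      exact ⟨by simp, by simp; omega⟩

-- parity step of the Python counter
lemma pvMod_succ (k : Int) : (PySem.Int.mod (k + 1) 2 == 1) = !(PySem.Int.mod k 2 == 1) := by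
  simp only [PySem.Int.mod]
  rw [Int.fmod_eq_emod, Int.fmod_eq_emod]
  simp only [if_pos (Or.inl (by omega : (0 : Int) ≤ 2)), add_zero]
  rcases Int.emod_two_eq_zero_or_one k with h | h <;> simp [h] <;> omega

-- pvGlue driven by the parity Bool instead of the counter
def pvGlueB : List (List Char) → Bool → List Char
  | [], _ => []
  | p :: ps, b => (if b then "\\textit{".toList else ['}']) ++ p ++ pvGlueB ps (!b)

lemma pvGlue_eq_glueB (ps : List (List Char)) : ∀ (k : Int),
    pvGlue ps k = pvGlueB ps (PySem.Int.mod k 2 == 1) := by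
  induction ps with
  | nil => intro k; rfl
  | cons p ps ih =>
    intro k
    simp only [pvGlue, pvGlueB]
    rw [ih (k + 1), pvMod_succ]

-- the key bridge: reassembling pvSplit1 with pvGlueB IS pvScan, and the piece count
-- parity matches pvPar
lemma split_glue_scan (cs : List Char) : ∀ (b : Bool),
    (pvSplit1 '`' cs).head! ++ pvGlueB (pvSplit1 '`' cs).tail b = pvScan cs b
    ∧ ((pvSplit1 '`' cs).tail.length % 2 == 0) = (pvPar cs b == b) := by
  induction cs with
  | nil => intro b; simp [pvSplit1, pvGlueB, pvScan, pvPar]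
  | cons x t ih =>
    intro b
    cases hs : pvSplit1 '`' t with
    | nil => exact absurd hs (pvSplit1_ne_nil '`' t)
    | cons p ps =>
      by_cases hx : x = '`'
      · subst hx
        rw [show pvSplit1 '`' ('`' :: t) = [] :: p :: ps from by simp [pvSplit1, hs]]
        obtain ⟨h1, h2⟩ := ih (!b)
        rw [hs] at h1 h2
        simp only [List.head!, List.tail] at h1 h2 ⊢
        constructor
        · simp [pvGlueB, pvScan, List.append_assoc, h1]
        · simp only [List.length_cons, pvPar]
          cases hpp : pvPar t (!b) <;> cases b <;> simp_all [Nat.add_mod]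
      · rw [show pvSplit1 '`' (x :: t) = (x :: p) :: ps from by simp [pvSplit1, hx, hs]]
        obtain ⟨h1, h2⟩ := ih b
        rw [hs] at h1 h2
        simp only [List.head!, List.tail] at h1 h2 ⊢
        constructor
        · simp only [pvScan, if_neg hx, List.cons_append]
          rw [h1]
        · simpa [pvPar, if_neg hx] using h2

lemma portA_eq (line : String) :
    check_alt_96_inline line
      = if PySem.Chars.isIn ['`'] line.toList && !(PySem.Chars.isIn ['`', '`', '`'] line.toList)
        then String.mk (pvBodyA line.toList) else line := rfl

lemma portB_eq (line : String) :
    check_alt_96_inline_alt line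
      = if !(PySem.Chars.isIn ['`'] line.toList) || PySem.Chars.isIn ['`', '`', '`'] line.toList
        then line else String.mk (pvBodyB line.toList) := rfl

lemma body_eq (cs : List Char) : pvBodyA cs = pvBodyB cs := by
  unfold pvBodyA pvBodyB
  rw [pvSplitOn_eq]
  cases hs : pvSplit1 '`' cs with
  | nil => exact absurd hs (pvSplit1_ne_nil '`' cs)
  | cons p ps =>
    rw [show PySem.List.enumerate (p :: ps) 0 = (0, p) :: PySem.List.enumerate ps 1 from rfl]
    rw [List.foldl_cons]
    rw [show pvStepA ([], (1 : Int)) (0, p) = (p, 1) from by simp [pvStepA]]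
    rw [foldA_tail ps 1 (by omega) p 1]
    rw [foldB_spec cs [] true]
    rw [pvGlue_eq_glueB ps 1, show (PySem.Int.mod 1 2 == 1) = true from by decide]
    obtain ⟨h1, h2⟩ := split_glue_scan cs true
    rw [hs] at h1 h2
    simp only [List.head!, List.tail] at h1 h2
    simp only []
    rw [h1]
    have hmod : (PySem.Int.mod (1 + ps.length) 2 == 0) = (ps.length % 2 == 1) := by
      simp only [PySem.Int.mod]
      rw [Int.fmod_eq_emod]
      simp only [if_pos (Or.inl (by omega : (0 : Int) ≤ 2)), add_zero]
      cases hpar : ps.length % 2 with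
      | zero =>
        have : (1 + (ps.length : Int)) % 2 = 1 := by omega
        simp [this]
      | succ m =>
        have : (1 + (ps.length : Int)) % 2 = 0 := by omega
        simp [this]
        omega
    rw [hmod]
    have h2' : (pvPar cs true == true) = (ps.length % 2 == 0) := h2.symm
    by_cases hp : ps.length % 2 = 0
    · have hpar : pvPar cs true = true := by
        have := h2'; simp [hp] at this; exact this
      simp [hp, hpar]
    · have hp1 : ps.length % 2 = 1 := by omega
      have hpar : (pvPar cs true == true) = false := by rw [h2']; simp [hp1]
      simp at hpar
      simp [hp1, hpar]

-- ===== VERDICT (by name: the statement is the Claim_ definition above) =====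
theorem check_alt_96_inline_spec : Claim_equal_check_alt_96_inline := by
  intro line _
  unfold Spec_check_alt_96_inline
  rw [portA_eq, portB_eq]
  by_cases hc : (PySem.Chars.isIn ['`'] line.toList && !(PySem.Chars.isIn ['`', '`', '`'] line.toList)) = true
  · have hc' : (!(PySem.Chars.isIn ['`'] line.toList) || PySem.Chars.isIn ['`', '`', '`'] line.toList) = false := by
      simp_all
    rw [if_pos hc, hc', if_neg (show ¬ (false = true) by simp), body_eq]
  · have hc' : (!(PySem.Chars.isIn ['`'] line.toList) || PySem.Chars.isIn ['`', '`', '`'] line.toList) = true := by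
      cases h : PySem.Chars.isIn ['`'] line.toList with
      | false => simp
      | true => rw [h] at hc; simp at hc; simp [hc]
    rw [if_neg hc, hc', if_pos rfl]
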